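-- pv_equiv track=rewrite | github.com/imsthegenius/NailAppOct | nail-app-mobile/scripts/sync_color_catalog.py | normalise_finish
-- ===== SOURCE A (Python) =====
-- from typing import Dict, Iterable, List, Optional, Tuple
--
-- CANONICAL_FINISHES = [
--     "glossy",
--     "cream",
--     "matte",
--     "chrome",
--     "shimmer",
--     "glitter",
--     "metallic",
--     "sheer",
--     "pearl",
--     "magnetic",
--     "reflective",
-- ]
--
-- FINISH_PRIORITY = {
--     "glitter": 100,
--     "reflective": 95,
--     "magnetic": 90,
--     "chrome": 85,
--     "metallic": 80,
--     "shimmer": 70,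
--     "pearl": 60,
--     "matte": 50,
--     "cream": 40,
--     "sheer": 35,
--     "glossy": 30,
-- }
--
-- FINISH_SYNONYMS = {
--     "standard": "glossy",
--     "high shine": "glossy",
--     "shine": "glossy",
--     "creme": "cream",
--     "cream": "cream",
--     "mat": "matte",
--     "matte": "matte",
--     "chrome": "chrome",
--     "mirror": "chrome",
--     "shimmer": "shimmer",
--     "shimmery": "shimmer",
--     "glitter": "glitter",
--     "glittery": "glitter",
--     "reflective": "reflective",
--     "cat-eye": "magnetic",
--     "magnetic": "magnetic",
--     "magnetic, cat-eye": "magnetic",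
--     "metallic": "metallic",
--     "foil": "metallic",
--     "sheer": "sheer",
--     "milky": "sheer",
--     "milky, sheer": "sheer",
--     "pearl": "pearl",
-- }
--
-- DEFAULT_FINISH = "glossy"
--
-- def normalise_finish(raw: Optional[str]) -> str:
--     if not raw:
--         return DEFAULT_FINISH
--     tokens = [token.strip().lower() for token in raw.replace("/", ",").split(",") if token.strip()]
--     if not tokens:
--         return DEFAULT_FINISH
--     mapped = [FINISH_SYNONYMS.get(token, token) for token in tokens]
--     valid = [token for token in mapped if token in CANONICAL_FINISHES]
--     if not valid:
--         return DEFAULT_FINISH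
--     # Choose the most visually distinctive finish using priority table
--     best = max(valid, key=lambda finish: FINISH_PRIORITY.get(finish, 0))
--     return best
-- ===== SOURCE B (Python) =====
-- from typing import Optional
--
-- CANONICAL_FINISHES = [
--     "glossy", "cream", "matte", "chrome", "shimmer", "glitter",
--     "metallic", "sheer", "pearl", "magnetic", "reflective",
-- ]
--
-- FINISH_PRIORITY = {
--     "glitter": 100, "reflective": 95, "magnetic": 90, "chrome": 85,
--     "metallic": 80, "shimmer": 70, "pearl": 60, "matte": 50,
--     "cream": 40, "sheer": 35, "glossy": 30,
-- }
--
-- FINISH_SYNONYMS = {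
--     "standard": "glossy", "high shine": "glossy", "shine": "glossy",
--     "creme": "cream", "cream": "cream", "mat": "matte", "matte": "matte",
--     "chrome": "chrome", "mirror": "chrome", "shimmer": "shimmer",
--     "shimmery": "shimmer", "glitter": "glitter", "glittery": "glitter",
--     "reflective": "reflective", "cat-eye": "magnetic", "magnetic": "magnetic",
--     "magnetic, cat-eye": "magnetic", "metallic": "metallic", "foil": "metallic",
--     "sheer": "sheer", "milky": "sheer", "milky, sheer": "sheer", "pearl": "pearl",
-- }
--
-- DEFAULT_FINISH = "glossy"
--
-- # Canonical finishes ordered by descending priority, computed once.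
-- _PRIORITY_ORDER = sorted(FINISH_PRIORITY, key=FINISH_PRIORITY.get, reverse=True)
--
-- def normalise_finish(raw: Optional[str]) -> str:
--     if not raw:
--         return DEFAULT_FINISH
--     valid = set()
--     for tok in raw.replace("/", ",").split(","):
--         t = tok.strip().lower()
--         m = FINISH_SYNONYMS.get(t, t)
--         if t and m in CANONICAL_FINISHES:
--             valid.add(m)
--     for finish in _PRIORITY_ORDER:
--         if finish in valid:
--             return finish
--     return DEFAULT_FINISH
-- ===== Notes on version B (the rewrite author's own statement) =====
-- stated objective: alternative
-- what changed: Replaces the max-by-priority reduction over the token list by a membership set built in one pass plus a scan of the canonical finishes in descending priority order returning the first one present.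
import Mathlib
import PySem

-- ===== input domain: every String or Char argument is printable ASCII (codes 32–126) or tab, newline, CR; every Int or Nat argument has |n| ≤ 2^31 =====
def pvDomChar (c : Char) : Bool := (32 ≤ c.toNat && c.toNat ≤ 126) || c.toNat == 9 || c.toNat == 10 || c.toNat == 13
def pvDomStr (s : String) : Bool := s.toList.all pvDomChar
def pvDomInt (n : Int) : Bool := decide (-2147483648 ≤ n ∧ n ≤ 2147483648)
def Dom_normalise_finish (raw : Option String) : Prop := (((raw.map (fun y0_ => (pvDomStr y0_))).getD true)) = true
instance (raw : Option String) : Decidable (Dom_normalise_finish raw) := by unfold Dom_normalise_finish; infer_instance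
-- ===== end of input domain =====

-- B replaces A's max-by-priority reduction over the valid-token list by a one-pass membership
-- set plus a scan of the canonical finishes in descending priority order (objective: alternative).

-- shared module constants
def CANONICAL_FINISHES : List String :=
  ["glossy", "cream", "matte", "chrome", "shimmer", "glitter",
   "metallic", "sheer", "pearl", "magnetic", "reflective"]

def FINISH_PRIORITY : PySem.Dict String Int :=
  PySem.Dict.ofList
    [("glitter", 100), ("reflective", 95), ("magnetic", 90), ("chrome", 85),
     ("metallic", 80), ("shimmer", 70), ("pearl", 60), ("matte", 50),
     ("cream", 40), ("sheer", 35), ("glossy", 30)]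

def FINISH_SYNONYMS : PySem.Dict String String :=
  PySem.Dict.ofList
    [("standard", "glossy"), ("high shine", "glossy"), ("shine", "glossy"),
     ("creme", "cream"), ("cream", "cream"), ("mat", "matte"), ("matte", "matte"),
     ("chrome", "chrome"), ("mirror", "chrome"), ("shimmer", "shimmer"),
     ("shimmery", "shimmer"), ("glitter", "glitter"), ("glittery", "glitter"),
     ("reflective", "reflective"), ("cat-eye", "magnetic"), ("magnetic", "magnetic"),
     ("magnetic, cat-eye", "magnetic"), ("metallic", "metallic"), ("foil", "metallic"),
     ("sheer", "sheer"), ("milky", "sheer"), ("milky, sheer", "sheer"), ("pearl", "pearl")]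

def DEFAULT_FINISH : String := "glossy"

-- ===== PORT A =====
def normalise_finish (raw : Option String) : String :=
  match raw with
  | none => DEFAULT_FINISH
  | some s =>
    if s = "" then DEFAULT_FINISH
    else
      let tokens := (((PySem.Str.split? (PySem.Str.replace s "/" ",") ",").getD []).filter
          (fun tok => decide (PySem.Str.strip tok ≠ ""))).map
          (fun tok => PySem.Str.lower (PySem.Str.strip tok))
      if tokens = [] then DEFAULT_FINISH
      else
        let mapped := tokens.map (fun tok => FINISH_SYNONYMS.getD tok tok)
        let valid := mapped.filter (fun tok => decide (tok ∈ CANONICAL_FINISHES))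
        if valid = [] then DEFAULT_FINISH
        else PySem.List.maxD valid (fun finish => FINISH_PRIORITY.getD finish 0) DEFAULT_FINISH

-- ===== PORT B =====
-- module-level constant of Source B: canonical finishes in descending priority order
def pvPriorityOrder : List String :=
  PySem.List.sorted FINISH_PRIORITY.keys (fun k => FINISH_PRIORITY.getD k 0) true

-- loop body of Source B's set-building pass
def pvStep (acc : PySem.Set String) (tok : String) : PySem.Set String :=
  let t := PySem.Str.lower (PySem.Str.strip tok)
  let m := FINISH_SYNONYMS.getD t t
  if t ≠ "" ∧ m ∈ CANONICAL_FINISHES then acc.add m else acc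

def normalise_finish_alt (raw : Option String) : String :=
  match raw with
  | none => DEFAULT_FINISH
  | some s =>
    if s = "" then DEFAULT_FINISH
    else
      let valid := ((PySem.Str.split? (PySem.Str.replace s "/" ",") ",").getD []).foldl
        pvStep (PySem.Set.ofList [])
      (pvPriorityOrder.find? (fun finish => valid.contains finish)).getD DEFAULT_FINISH

-- ===== PRECONDITION & SPEC =====
def Spec_normalise_finish (raw : Option String) (out : String) : Prop := out = normalise_finish_alt raw
instance (raw : Option String) (out : String) : Decidable (Spec_normalise_finish raw out) := by unfold Spec_normalise_finish; infer_instance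

-- ===== CLAIM (what is proved, stated in full; the proofs are below) =====
def Claim_equal_normalise_finish : Prop := ∀ (raw : Option String), Dom_normalise_finish raw → Spec_normalise_finish raw (normalise_finish raw)

-- ===== LEMMAS AND PROOFS =====

def pvPrio (f : String) : Int := FINISH_PRIORITY.getD f 0

theorem pv_lower_eq_empty (x : String) : PySem.Str.lower x = "" ↔ x = "" := by
  constructor
  · intro h
    have h2 := congrArg String.toList h
    simp [PySem.Str.lower, PySem.Chars.lower] at h2
    exact h2
  · intro h; subst h; rfl

-- membership in B's fold-built set
theorem pv_mem_fold (ts : List String) :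
    ∀ (acc : PySem.Set String) (x : String),
      x ∈ ts.foldl pvStep acc ↔
        x ∈ acc ∨ ∃ tok ∈ ts,
          (PySem.Str.strip tok ≠ "" ∧
            FINISH_SYNONYMS.getD (PySem.Str.lower (PySem.Str.strip tok))
              (PySem.Str.lower (PySem.Str.strip tok)) = x) ∧ x ∈ CANONICAL_FINISHES := by
  induction ts with
  | nil => simp
  | cons tok ts ih =>
    intro acc x
    rw [List.foldl_cons, ih]
    show x ∈ pvStep acc tok ∨ _ ↔ _
    unfold pvStep
    by_cases hc : PySem.Str.lower (PySem.Str.strip tok) ≠ "" ∧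
        FINISH_SYNONYMS.getD (PySem.Str.lower (PySem.Str.strip tok))
          (PySem.Str.lower (PySem.Str.strip tok)) ∈ CANONICAL_FINISHES
    · rw [if_pos hc, PySem.Set.mem_add]
      simp only [List.mem_cons]
      constructor
      · rintro ((h | h) | ⟨t, ht, hp⟩)
        · exact Or.inl h
        · exact Or.inr ⟨tok, Or.inl rfl, ⟨fun e => hc.1 ((pv_lower_eq_empty _).mpr e), h.symm⟩,
            h ▸ hc.2⟩
        · exact Or.inr ⟨t, Or.inr ht, hp⟩
      · rintro (h | ⟨t, (rfl | ht), hp⟩)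
        · exact Or.inl (Or.inl h)
        · exact Or.inl (Or.inr hp.1.2.symm)
        · exact Or.inr ⟨t, ht, hp⟩
    · rw [if_neg hc]
      simp only [List.mem_cons]
      constructor
      · rintro (h | ⟨t, ht, hp⟩)
        · exact Or.inl h
        · exact Or.inr ⟨t, Or.inr ht, hp⟩
      · rintro (h | ⟨t, (rfl | ht), hp⟩)
        · exact Or.inl h
        · exact absurd ⟨fun e => hp.1.1 ((pv_lower_eq_empty _).mp e), hp.1.2 ▸ hp.2⟩ hc
        · exact Or.inr ⟨t, ht, hp⟩

-- descending-priority scan returns the maximal member of S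
theorem pv_find_max (S : List String) (ord : List String)
    (hpw : List.Pairwise (fun a b => pvPrio b < pvPrio a) ord) :
    ∀ m, m ∈ ord → m ∈ S → (∀ y ∈ S, pvPrio y ≤ pvPrio m) →
      ord.find? (fun f => decide (f ∈ S)) = some m := by
  induction ord with
  | nil => intro m hm; exact absurd hm (List.not_mem_nil)
  | cons o rest ih =>
    intro m hm hmS hmax
    rcases List.pairwise_cons.mp hpw with ⟨ho, hrest⟩
    by_cases hoS : o ∈ S
    · have heq : o = m := by
        by_contra hne
        have hmrest : m ∈ rest := by
          rcases List.mem_cons.mp hm with h | h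
          · exact absurd h.symm hne
          · exact h
        have h1 := ho m hmrest
        have h2 := hmax o hoS
        omega
      subst heq
      exact List.find?_cons_of_pos (by simpa using hoS)
    · have hmrest : m ∈ rest := by
        rcases List.mem_cons.mp hm with h | h
        · exact absurd (h ▸ hmS) hoS
        · exact h
      rw [List.find?_cons_of_neg (by simpa using hoS)]
      exact ih hrest m hmrest hmS hmax

theorem pv_canon_mem_order : ∀ m ∈ CANONICAL_FINISHES, m ∈ pvPriorityOrder := by
  intro m h
  fin_cases h <;> decide

theorem pv_order_pairwise :
    List.Pairwise (fun a b => pvPrio b < pvPrio a) pvPriorityOrder := by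
  decide

-- ===== VERDICT (by name: the statement is the Claim_ definition above) =====
theorem normalise_finish_spec : Claim_equal_normalise_finish := by
  intro raw _
  unfold Spec_normalise_finish normalise_finish normalise_finish_alt
  cases raw with
  | none => rfl
  | some s =>
    by_cases hs : s = ""
    · simp [hs]
    · dsimp only
      rw [if_neg hs, if_neg hs]
      set ts := (PySem.Str.split? (PySem.Str.replace s "/" ",") ",").getD [] with hts
      set tokens := (ts.filter (fun tok => decide (PySem.Str.strip tok ≠ ""))).map
          (fun tok => PySem.Str.lower (PySem.Str.strip tok)) with htok
      set mapped := tokens.map (fun tok => FINISH_SYNONYMS.getD tok tok) with hmap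
      set valid := mapped.filter (fun tok => decide (tok ∈ CANONICAL_FINISHES)) with hval
      set S := ts.foldl pvStep (PySem.Set.ofList []) with hS
      have hmem : ∀ x, x ∈ S ↔ x ∈ valid := by
        intro x
        rw [hS, pv_mem_fold]
        simp only [hval, hmap, htok, List.mem_filter, List.mem_map, List.mem_filter,
          decide_eq_true_eq]
        constructor
        · rintro (h | ⟨tok, htk, ⟨hne, hx⟩, hconf⟩)
          · simp [PySem.Set.ofList] at h
          · exact ⟨⟨PySem.Str.lower (PySem.Str.strip tok), ⟨tok, ⟨htk, hne⟩, rfl⟩, hx⟩, hconf⟩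
        · rintro ⟨⟨t, ⟨tok, ⟨htk, hne⟩, rfl⟩, hx⟩, hconf⟩
          exact Or.inr ⟨tok, htk, ⟨hne, hx⟩, hconf⟩
      have hfun : (fun finish => PySem.Set.contains S finish) = (fun f => decide (f ∈ S)) := by
        funext f; simp [PySem.Set.contains]
      by_cases hv : valid = []
      · have hnone : pvPriorityOrder.find? (fun f => decide (f ∈ S)) = none := by
          rw [List.find?_eq_none]
          intro f _
          simp only [decide_eq_true_eq, hmem f, hv]
          exact List.not_mem_nil
        rw [hfun, hnone]
        by_cases ht : tokens = []
        · rw [if_pos ht]; rfl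
        · rw [if_neg ht, if_pos hv]; rfl
      · have ht : tokens ≠ [] := by
          intro h; apply hv; rw [hval, hmap, h]; rfl
        rcases hmq : PySem.List.max? valid (fun finish => FINISH_PRIORITY.getD finish 0)
          with _ | m
        · exact absurd ((PySem.List.max?_eq_none_iff _ _).mp hmq) hv
        · have hmval : m ∈ valid := PySem.List.max?_mem hmq
          have hmax : ∀ y ∈ valid, pvPrio y ≤ pvPrio m := PySem.List.max?_isMax hmq
          have hmc : m ∈ CANONICAL_FINISHES := by
            rw [hval, List.mem_filter] at hmval
            exact of_decide_eq_true hmval.2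
          have hfind : pvPriorityOrder.find? (fun f => decide (f ∈ S)) = some m := by
            apply pv_find_max S pvPriorityOrder pv_order_pairwise m
              (pv_canon_mem_order m hmc) ((hmem m).mpr hmval)
            intro y hy
            exact hmax y ((hmem y).mp hy)
          rw [hfun, hfind, if_neg ht, if_neg hv]
          simp [PySem.List.maxD, hmq]
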